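-- pv_equiv track=rewrite | github.com/Behnoushin/Algorithm | SearchLastNegativeBeforeFirstPositiveGreaterThanN.py | searchLastNegativeBeforeFirstPositiveGreaterThanN
-- ===== SOURCE A (Python) =====
-- def searchLastNegativeBeforeFirstPositiveGreaterThanN(nums: list[int], N: int) -> int | None:
--     last_negative = None
--     for x in nums:
--         if x > N:
--             break
--         if x < 0:
--             last_negative = x
--     return last_negative
-- ===== SOURCE B (Python) =====
-- def searchLastNegativeBeforeFirstPositiveGreaterThanN(nums: list[int], N: int) -> int | None:
--     # Phase 1: prefix up to (not including) the first element exceeding N.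
--     cut = next((i for i, x in enumerate(nums) if x > N), len(nums))
--     prefix = nums[:cut]
--     # Phase 2: first negative seen from the end of the prefix.
--     return next((x for x in reversed(prefix) if x < 0), None)
-- ===== Notes on version B (the rewrite author's own statement) =====
-- stated objective: alternative
-- what changed: Replaces the single forward loop with a running last-negative variable by a two-phase decomposition: find the cut index of the first element > N, slice the prefix, then reverse-scan the prefix for the first negative.
import Mathlib
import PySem

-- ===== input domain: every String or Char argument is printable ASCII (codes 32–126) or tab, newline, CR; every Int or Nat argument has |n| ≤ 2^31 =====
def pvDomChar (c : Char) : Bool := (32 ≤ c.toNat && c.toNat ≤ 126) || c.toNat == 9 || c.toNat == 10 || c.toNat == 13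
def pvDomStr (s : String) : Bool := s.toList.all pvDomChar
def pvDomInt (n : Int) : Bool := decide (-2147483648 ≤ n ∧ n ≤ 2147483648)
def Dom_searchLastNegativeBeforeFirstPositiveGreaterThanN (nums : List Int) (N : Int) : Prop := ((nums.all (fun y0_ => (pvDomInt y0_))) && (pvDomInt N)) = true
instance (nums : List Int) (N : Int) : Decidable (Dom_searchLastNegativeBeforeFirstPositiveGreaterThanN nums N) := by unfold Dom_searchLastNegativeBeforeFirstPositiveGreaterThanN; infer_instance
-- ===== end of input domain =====

-- B replaces A's single forward loop with a two-phase decomposition (cut index + reverse scan); same cost, alternative structure.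


-- ===== PORT A =====
-- A's loop with break, as structural recursion over the list carrying last_negative.
def pvGoA (N : Int) (nums : List Int) (lastNeg : Option Int) : Option Int :=
  match nums with
  | [] => lastNeg
  | x :: xs =>
    if x > N then lastNeg
    else pvGoA N xs (if x < 0 then some x else lastNeg)

def searchLastNegativeBeforeFirstPositiveGreaterThanN (nums : List Int) (N : Int) : Option Int :=
  pvGoA N nums none

-- ===== PORT B =====
-- cut = index of first element > N (default len); prefix = nums[:cut]; first negative from the end.
def searchLastNegativeBeforeFirstPositiveGreaterThanN_alt (nums : List Int) (N : Int) : Option Int :=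
  let cut : Nat := (nums.findIdx? (fun x => decide (x > N))).getD nums.length
  let pref := nums.take cut
  pref.reverse.find? (fun x => decide (x < 0))

-- ===== PRECONDITION & SPEC =====
def Spec_searchLastNegativeBeforeFirstPositiveGreaterThanN (nums : List Int) (N : Int) (out : Option Int) : Prop := out = searchLastNegativeBeforeFirstPositiveGreaterThanN_alt nums N
instance (nums : List Int) (N : Int) (out : Option Int) : Decidable (Spec_searchLastNegativeBeforeFirstPositiveGreaterThanN nums N out) := by unfold Spec_searchLastNegativeBeforeFirstPositiveGreaterThanN; infer_instance

-- ===== CLAIM (what is proved, stated in full; the proofs are below) =====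
def Claim_equal_searchLastNegativeBeforeFirstPositiveGreaterThanN : Prop := ∀ (nums : List Int) (N : Int), Dom_searchLastNegativeBeforeFirstPositiveGreaterThanN nums N → Spec_searchLastNegativeBeforeFirstPositiveGreaterThanN nums N (searchLastNegativeBeforeFirstPositiveGreaterThanN nums N)

-- ===== LEMMAS AND PROOFS =====

-- B's take-at-cut-index equals takeWhile of the negated predicate.
theorem pv_take_findIdx (N : Int) (nums : List Int) :
    nums.take ((nums.findIdx? (fun x => decide (x > N))).getD nums.length)
      = nums.takeWhile (fun x => !decide (x > N)) := by
  induction nums with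
  | nil => rfl
  | cons x xs ih =>
    rw [List.findIdx?_cons]
    by_cases h : x > N
    · simp only [h, decide_true, if_true, Option.getD_some, List.take_zero,
        List.takeWhile_cons, Bool.not_true, Bool.false_eq_true, reduceIte]
    · simp only [h, decide_false, Bool.false_eq_true, if_false, List.takeWhile_cons,
        Bool.not_false]
      cases hfi : xs.findIdx? (fun x => decide (x > N)) with
      | none =>
        simp only [hfi, Option.map_none, Option.getD_none, List.length_cons,
          List.take_succ_cons, Bool.not_false, reduceIte]
        rw [← ih, hfi, Option.getD_none]
      | some i =>
        simp only [Option.map_some, Option.getD_some, List.take_succ_cons, reduceIte]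
        rw [← ih, hfi, Option.getD_some]

-- Loop invariant: A's loop equals the reverse-scan of the takeWhile prefix, falling back to the accumulator.
theorem pvGoA_eq (N : Int) (nums : List Int) (acc : Option Int) :
    pvGoA N nums acc
      = match (nums.takeWhile (fun x => !decide (x > N))).reverse.find? (fun x => decide (x < 0)) with
        | some y => some y
        | none => acc := by
  induction nums generalizing acc with
  | nil => rfl
  | cons x xs ih =>
    by_cases h : x > N
    · simp only [pvGoA, h, if_true, List.takeWhile_cons, decide_true, Bool.not_true,
        Bool.false_eq_true, reduceIte, List.reverse_nil, List.find?_nil]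
    · simp only [pvGoA, h, if_false, List.takeWhile_cons, decide_false, Bool.not_false,
        reduceIte, List.reverse_cons]
      rw [ih, List.find?_append]
      cases hf : (xs.takeWhile (fun x => !decide (x > N))).reverse.find? (fun x => decide (x < 0)) with
      | some y => simp
      | none =>
        by_cases hx : x < 0 <;> simp [List.find?, hx]

-- ===== VERDICT (by name: the statement is the Claim_ definition above) =====
theorem searchLastNegativeBeforeFirstPositiveGreaterThanN_spec : Claim_equal_searchLastNegativeBeforeFirstPositiveGreaterThanN := by
  intro nums N _
  show _ = _
  simp only [searchLastNegativeBeforeFirstPositiveGreaterThanN,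
    searchLastNegativeBeforeFirstPositiveGreaterThanN_alt]
  rw [pvGoA_eq, pv_take_findIdx]
  cases hf : (nums.takeWhile (fun x => !decide (x > N))).reverse.find? (fun x => decide (x < 0)) <;> simp
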